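-- pv_equiv track=rewrite | github.com/rishukumar15/SNS | Assignment1/copy/prg8_BT18CSE060.py | convert_into_CRT_form
-- ===== SOURCE A (Python) =====
-- def extended_euclidean(a,b):        #to calculate multiplicative inverse under modulo
--
--     #Base Case
--     if b == 0:
--         return 1,0
--
--     x1,y1 = extended_euclidean(b,a%b)
--
--     y = x1 - (a//b) * y1
--     x = y1
--
--     return x,y
--
-- def convert_into_CRT_form(equations):
--
--     new_equations = []
--
--     for i in range(len(equations)):
--
--         eq = equations[i]
--
--         a = eq[0]
--         b = eq[1]
--         m = eq[2]
--         a_inv,y = extended_euclidean(a,m)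
--
--         a_inv = (a_inv+m)%m
--
--         temp = []
--         temp.append(1)
--         temp.append(b*a_inv)
--         temp.append(m)
--
--         new_equations.append(temp)
--
--     return new_equations
-- ===== SOURCE B (Python) =====
-- def extended_euclidean(a, b):
--     # iterative extended Euclid: same Bezout coefficients, no call stack
--     old_x, x = 1, 0
--     old_y, y = 0, 1
--     while b != 0:
--         q = a // b
--         a, b = b, a - q * b
--         old_x, x = x, old_x - q * x
--         old_y, y = y, old_y - q * y
--     return old_x, old_y
--
-- def convert_into_CRT_form(equations):
--     new_equations = []
--     for eq in equations:
--         a, b, m = eq[0], eq[1], eq[2]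
--         a_inv, _ = extended_euclidean(a, m)
--         a_inv = (a_inv + m) % m
--         new_equations.append([1, b * a_inv, m])
--     return new_equations
-- ===== Notes on version B (the rewrite author's own statement) =====
-- stated objective: alternative
-- what changed: extended_euclidean is rewritten as an iterative loop maintaining Bezout coefficient pairs instead of recursion on the call stack (same coefficients proved by a linear-combination invariant); the CRT loop iterates directly over the equations.
import Mathlib
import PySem

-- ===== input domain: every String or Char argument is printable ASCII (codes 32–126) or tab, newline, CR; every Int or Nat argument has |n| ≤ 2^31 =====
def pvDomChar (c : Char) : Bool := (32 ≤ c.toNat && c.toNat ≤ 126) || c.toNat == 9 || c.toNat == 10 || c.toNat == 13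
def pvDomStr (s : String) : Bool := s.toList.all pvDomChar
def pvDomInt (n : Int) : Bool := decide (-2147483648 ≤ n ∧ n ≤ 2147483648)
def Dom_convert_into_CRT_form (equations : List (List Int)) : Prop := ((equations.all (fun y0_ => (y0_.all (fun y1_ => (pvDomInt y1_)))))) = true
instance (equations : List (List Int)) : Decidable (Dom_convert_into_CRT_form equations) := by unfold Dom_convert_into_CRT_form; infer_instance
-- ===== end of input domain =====

-- B replaces A's recursive extended_euclidean with an iterative Bezout-coefficient loop
-- and maps directly over the equations; same values (objective: alternative, same cost).


-- termination measure fact used by both ports' helpers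
theorem pvModNatAbsLt (a b : Int) (hb : b ≠ 0) :
    (PySem.Int.mod a b).natAbs < b.natAbs := by
  rcases lt_or_gt_of_ne hb with h | h
  · have := PySem.Int.mod_neg_bounds a h
    omega
  · have h1 := PySem.Int.mod_nonneg a h
    have h2 := PySem.Int.mod_lt a h
    omega

-- a - (a//b)*b = a % b (Python semantics)
theorem pvSubFloordivMul (a b : Int) :
    a - PySem.Int.floordiv a b * b = PySem.Int.mod a b := by
  have := PySem.Int.floordiv_mul_add_mod a b
  omega

-- ===== PORT A =====
-- recursive extended_euclidean, step for step
def pvEgcdA (a b : Int) : Int × Int :=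
  if b = 0 then (1, 0)
  else
    let p := pvEgcdA b (PySem.Int.mod a b)
    let y := p.1 - (PySem.Int.floordiv a b) * p.2
    let x := p.2
    (x, y)
termination_by b.natAbs
decreasing_by exact pvModNatAbsLt a b (by assumption)

def convert_into_CRT_form (equations : List (List Int)) : List (List Int) :=
  (PySem.List.pyRange 0 (equations.length : Int) 1).foldl
    (fun new_equations i =>
      let eq := PySem.List.pyGetD equations i []
      let a := PySem.List.pyGetD eq 0 0
      let b := PySem.List.pyGetD eq 1 0
      let m := PySem.List.pyGetD eq 2 0
      let p := pvEgcdA a m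
      let a_inv := PySem.Int.mod (p.1 + m) m
      new_equations ++ [[1, b * a_inv, m]]) []

-- ===== PORT B =====
-- iterative extended_euclidean: while b != 0 update (a,b) and both coefficient pairs
def pvEgcdLoop (a b ox x oy y : Int) : Int × Int :=
  if b = 0 then (ox, oy)
  else
    let q := PySem.Int.floordiv a b
    pvEgcdLoop b (a - q * b) x (ox - q * x) y (oy - q * y)
termination_by b.natAbs
decreasing_by simp only [pvSubFloordivMul]; exact pvModNatAbsLt a b (by assumption)

def pvEgcdB (a b : Int) : Int × Int :=
  pvEgcdLoop a b 1 0 0 1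

def convert_into_CRT_form_alt (equations : List (List Int)) : List (List Int) :=
  equations.map (fun eq =>
    let a := PySem.List.pyGetD eq 0 0
    let b := PySem.List.pyGetD eq 1 0
    let m := PySem.List.pyGetD eq 2 0
    let a_inv0 := (pvEgcdB a m).1
    let a_inv := PySem.Int.mod (a_inv0 + m) m
    [1, b * a_inv, m])

-- ===== PRECONDITION & SPEC =====
-- Pre_ excludes exactly the inputs where Python A raises: an equation with fewer than
-- three entries (IndexError) or modulus 0 (ZeroDivisionError in (a_inv+m)%m).
def Pre_convert_into_CRT_form (equations : List (List Int)) : Prop :=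
  ∀ eq ∈ equations, 3 ≤ eq.length ∧ eq.getD 2 0 ≠ 0

instance (equations : List (List Int)) : Decidable (Pre_convert_into_CRT_form equations) := by
  unfold Pre_convert_into_CRT_form; infer_instance

def pvWitness_convert_into_CRT_form : List (List Int) := [[3, 2, 5], [4, 1, 7]]

def Spec_convert_into_CRT_form (equations : List (List Int)) (out : List (List Int)) : Prop :=
  out = convert_into_CRT_form_alt equations

instance (equations : List (List Int)) (out : List (List Int)) : Decidable (Spec_convert_into_CRT_form equations out) := by
  unfold Spec_convert_into_CRT_form; infer_instance

-- ===== CLAIM (what is proved, stated in full; the proofs are below) =====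
def Claim_equal_convert_into_CRT_form : Prop := ∀ (equations : List (List Int)), Dom_convert_into_CRT_form equations → Pre_convert_into_CRT_form equations → Spec_convert_into_CRT_form equations (convert_into_CRT_form equations)

-- ===== LEMMAS AND PROOFS =====

-- the iterative loop computes a linear combination of the recursive Bezout pair
theorem pvEgcdLoop_eq (a b ox x oy y : Int) :
    pvEgcdLoop a b ox x oy y =
      (ox * (pvEgcdA a b).1 + x * (pvEgcdA a b).2,
       oy * (pvEgcdA a b).1 + y * (pvEgcdA a b).2) := by
  fun_induction pvEgcdLoop a b ox x oy y with
  | case1 =>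
      rw [pvEgcdA]
      simp
  | case2 a b ox x oy y hb q ih =>
      have hq : a - q * b = PySem.Int.mod a b := by
        simpa [q] using pvSubFloordivMul a b
      rw [ih, hq]
      conv_rhs => rw [pvEgcdA]
      simp only [if_neg hb, Prod.mk.injEq, q]
      constructor <;> ring

-- hence the two helpers agree everywhere
theorem pvEgcdB_eq (a b : Int) : pvEgcdB a b = pvEgcdA a b := by
  rw [pvEgcdB, pvEgcdLoop_eq]
  simp

-- ===== VERDICT (by name: the statement is the Claim_ definition above) =====
theorem convert_into_CRT_form_spec : Claim_equal_convert_into_CRT_form := by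
  intro equations _ _
  unfold Spec_convert_into_CRT_form convert_into_CRT_form convert_into_CRT_form_alt
  rw [PySem.List.foldl_append_singleton_eq_map]
  rw [show (fun i =>
        let eq := PySem.List.pyGetD equations i []
        let a := PySem.List.pyGetD eq 0 0
        let b := PySem.List.pyGetD eq 1 0
        let m := PySem.List.pyGetD eq 2 0
        let p := pvEgcdA a m
        let a_inv := PySem.Int.mod (p.1 + m) m
        ([1, b * a_inv, m] : List Int)) =
      (fun eq =>
        let a := PySem.List.pyGetD eq 0 0
        let b := PySem.List.pyGetD eq 1 0
        let m := PySem.List.pyGetD eq 2 0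
        let p := pvEgcdA a m
        let a_inv := PySem.Int.mod (p.1 + m) m
        ([1, b * a_inv, m] : List Int)) ∘ (fun i => PySem.List.pyGetD equations i []) from rfl]
  rw [← List.map_map, PySem.List.map_pyGetD_pyRange_zero']
  simp [pvEgcdB_eq]
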